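-- pv_equiv track=rewrite | github.com/Perfectionist-code/STEPIK_COURSES | Year course EGE 2025/3.22 29.10. Сложные задачи №9 уровня ЕГЭ/3_22_1.py | condition_2
-- ===== SOURCE A (Python) =====
-- def condition_2(lst_s: list) -> bool:
--     sum_pos = 0
--     sum_neg = 0
--     for num in lst_s:
--         if num > 0:
--             sum_pos += num
--         elif num < 0:
--             sum_neg += num
--     return abs(sum_neg) > sum_pos
-- ===== SOURCE B (Python) =====
-- def condition_2(lst_s: list) -> bool:
--     return sum(lst_s) < 0
-- ===== Notes on version B (the rewrite author's own statement) =====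
-- stated objective: simpler
-- what changed: Replaces the two-accumulator sign-splitting loop and abs comparison with a single total: abs(sum_neg) > sum_pos iff sum(lst) < 0, so B is just sum(lst_s) < 0.
import Mathlib
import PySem

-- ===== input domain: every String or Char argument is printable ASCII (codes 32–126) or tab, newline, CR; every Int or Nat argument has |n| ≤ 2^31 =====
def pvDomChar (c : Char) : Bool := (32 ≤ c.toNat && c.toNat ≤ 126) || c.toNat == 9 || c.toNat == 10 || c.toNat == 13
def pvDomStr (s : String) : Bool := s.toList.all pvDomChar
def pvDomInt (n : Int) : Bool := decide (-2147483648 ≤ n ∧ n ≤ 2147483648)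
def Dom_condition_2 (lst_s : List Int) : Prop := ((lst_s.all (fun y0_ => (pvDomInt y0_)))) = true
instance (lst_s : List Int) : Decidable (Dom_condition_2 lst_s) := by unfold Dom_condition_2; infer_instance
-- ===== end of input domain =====

-- B replaces A's two-accumulator sign-splitting loop by a single running total: simpler.

-- ===== PORT A =====
-- loop over lst_s accumulating (sum_pos, sum_neg); then abs(sum_neg) > sum_pos
def condition_2 (lst_s : List Int) : Bool :=
  let st := lst_s.foldl
    (fun (acc : Int × Int) num =>
      if num > 0 then (acc.1 + num, acc.2)
      else if num < 0 then (acc.1, acc.2 + num)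
      else acc)
    (0, 0)
  decide (|st.2| > st.1)

-- ===== PORT B =====
-- sum(lst_s) < 0
def condition_2_alt (lst_s : List Int) : Bool :=
  decide (lst_s.foldl (· + ·) 0 < 0)

-- ===== PRECONDITION & SPEC =====
def Spec_condition_2 (lst_s : List Int) (out : Bool) : Prop := out = condition_2_alt lst_s
instance (lst_s : List Int) (out : Bool) : Decidable (Spec_condition_2 lst_s out) := by unfold Spec_condition_2; infer_instance

-- ===== CLAIM (what is proved, stated in full; the proofs are below) =====
def Claim_equal_condition_2 : Prop := ∀ (lst_s : List Int), Dom_condition_2 lst_s → Spec_condition_2 lst_s (condition_2 lst_s)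

-- ===== LEMMAS AND PROOFS =====

-- Invariant: A's fold from (p, n) yields (p + positives, n + negatives), and B's fold adds the total.
theorem pv_fold_inv (lst_s : List Int) (p n : Int) (hp : 0 ≤ p) (hn : n ≤ 0) :
    let st := lst_s.foldl
      (fun (acc : Int × Int) num =>
        if num > 0 then (acc.1 + num, acc.2)
        else if num < 0 then (acc.1, acc.2 + num)
        else acc)
      (p, n)
    0 ≤ st.1 ∧ st.2 ≤ 0 ∧ st.1 + st.2 = lst_s.foldl (· + ·) (p + n) := by
  induction lst_s generalizing p n with
  | nil => exact ⟨hp, hn, rfl⟩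
  | cons x xs ih =>
    simp only [List.foldl_cons]
    split_ifs with h1 h2
    · have := ih (p + x) n (by omega) hn
      simpa [add_right_comm] using this
    · have := ih p (n + x) hp (by omega)
      simpa [add_assoc] using this
    · have hx : x = 0 := by omega
      have := ih p n hp hn
      simpa [hx] using this

theorem condition_2_eq (lst_s : List Int) : condition_2 lst_s = condition_2_alt lst_s := by
  have h := pv_fold_inv lst_s 0 0 le_rfl le_rfl
  simp only [] at h
  obtain ⟨h1, h2, h3⟩ := h
  simp only [condition_2, condition_2_alt]
  rw [show (0 : Int) + 0 = 0 from rfl] at h3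
  have habs : |(lst_s.foldl
      (fun (acc : Int × Int) num =>
        if num > 0 then (acc.1 + num, acc.2)
        else if num < 0 then (acc.1, acc.2 + num)
        else acc)
      ((0 : Int), (0 : Int))).2| = -(lst_s.foldl
      (fun (acc : Int × Int) num =>
        if num > 0 then (acc.1 + num, acc.2)
        else if num < 0 then (acc.1, acc.2 + num)
        else acc)
      ((0 : Int), (0 : Int))).2 := abs_of_nonpos h2
  simp only [habs]
  rw [decide_eq_decide]
  omega

-- ===== VERDICT (by name: the statement is the Claim_ definition above) =====
theorem condition_2_spec : Claim_equal_condition_2 := by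
  intro lst_s _
  exact condition_2_eq lst_s
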